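-- pv_equiv track=rewrite | github.com/100hard/SciNetz | backend/app/parsing/pipeline.py | _clean_author_candidate
-- ===== SOURCE A (Python) =====
-- from typing import Dict, Iterable, List, Optional, Tuple
--
-- def _clean_author_candidate(candidate: str) -> str:
--     tokens = candidate.strip().split()
--     cleaned: List[str] = []
--     for token in tokens:
--         normalized = token.strip(",")
--         if not normalized:
--             continue
--         if normalized.isdigit():
--             break
--         if normalized.isupper() and len(normalized) > 1:
--             break
--         cleaned.append(normalized)
--     return " ".join(cleaned)
-- ===== SOURCE B (Python) =====
-- def _emit(tok, out):
--     n = tok.strip(",")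
--     if not n:
--         return (False, out)
--     if n.isdigit() or (n.isupper() and len(n) > 1):
--         return (True, out)
--     return (False, n if not out else out + " " + n)
--
--
-- def _clean_author_candidate(candidate: str) -> str:
--     out = ""
--     tok = ""
--     for ch in candidate:
--         if ch.isspace():
--             done, out = _emit(tok, out)
--             if done:
--                 return out
--             tok = ""
--         else:
--             tok += ch
--     return _emit(tok, out)[1]
-- ===== Notes on version B (the rewrite author's own statement) =====
-- stated objective: alternative
-- what changed: Replaces A's tokenize-then-filter-then-join pipeline (strip/split into a token list, a loop accumulating a cleaned list, ' '.join) with a single character-level streaming state machine that never materializes a token list: it scans the characters once, flushing each pending token at whitespace boundaries directly into the output string and returning early at the first stop token.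
import Mathlib
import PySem

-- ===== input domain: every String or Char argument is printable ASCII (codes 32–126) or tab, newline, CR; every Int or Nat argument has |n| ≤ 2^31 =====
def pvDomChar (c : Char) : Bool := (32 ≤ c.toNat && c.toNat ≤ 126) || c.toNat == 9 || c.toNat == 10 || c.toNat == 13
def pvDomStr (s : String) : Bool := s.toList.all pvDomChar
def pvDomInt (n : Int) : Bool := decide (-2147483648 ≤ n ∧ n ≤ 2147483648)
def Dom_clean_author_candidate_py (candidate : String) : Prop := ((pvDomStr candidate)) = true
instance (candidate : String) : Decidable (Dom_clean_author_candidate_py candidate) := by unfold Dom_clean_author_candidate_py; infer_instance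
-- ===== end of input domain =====

-- B replaces A's split/accumulate/join token pipeline by a single character-level streaming
-- state machine that builds the output string directly; same cost, different structure.

-- hand port of Python str.isupper (PySem has none): at least one cased character and no lowercase one;
-- on the ASCII domain the cased characters are exactly the letters, so this is exact there.
def charsIsupper (cs : List Char) : Bool :=
  cs.any PySem.Chars.isupper && cs.all (fun c => !PySem.Chars.islower c)

def pyStrIsupper (s : String) : Bool := charsIsupper s.toList

-- ===== PORT A =====
def cleanLoopA : List String → List String → List String
  | [], cleaned => cleaned
  | token :: ts, cleaned =>
    let normalized := PySem.Str.stripChars token ","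
    if normalized = "" then cleanLoopA ts cleaned
    else if PySem.Str.strIsdigit normalized then cleaned
    else if pyStrIsupper normalized && PySem.Str.len normalized > 1 then cleaned
    else cleanLoopA ts (cleaned ++ [normalized])

def clean_author_candidate_py (candidate : String) : String :=
  PySem.Str.join " " (cleanLoopA (PySem.Str.split₀ (PySem.Str.strip candidate)) [])

-- ===== PORT B =====
-- B's mutable Python strings `tok`/`out` are modeled as List Char (Lean's own String ops are
-- kernel-opaque); the recursion is B's for-loop over the characters, step for step.

-- _emit(tok, out) from Source B
def emitB (tok out : List Char) : Bool × List Char :=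
  let n := PySem.Chars.stripChars tok [',']
  if n.isEmpty then (false, out)
  else if PySem.Chars.strIsdigit n || (charsIsupper n && n.length > 1) then (true, out)
  else (false, if out.isEmpty then n else out ++ ' ' :: n)

-- the `for ch in candidate` loop of Source B with its early return
def loopB : List Char → List Char → List Char → List Char
  | [], tok, out => (emitB tok out).2
  | c :: cs, tok, out =>
    if PySem.Chars.isspace c then
      match emitB tok out with
      | (true, o) => o
      | (false, o) => loopB cs [] o
    else loopB cs (tok ++ [c]) out

def clean_author_candidate_py_alt (candidate : String) : String :=
  String.ofList (loopB candidate.toList [] [])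

-- ===== PRECONDITION & SPEC =====
def Spec_clean_author_candidate_py (candidate : String) (out : String) : Prop := out = clean_author_candidate_py_alt candidate
instance (candidate : String) (out : String) : Decidable (Spec_clean_author_candidate_py candidate out) := by unfold Spec_clean_author_candidate_py; infer_instance

-- ===== CLAIM (what is proved, stated in full; the proofs are below) =====
def Claim_equal_clean_author_candidate_py : Prop := ∀ (candidate : String), Dom_clean_author_candidate_py candidate → Spec_clean_author_candidate_py candidate (clean_author_candidate_py candidate)

-- ===== LEMMAS AND PROOFS =====

-- stop predicate on a normalized (comma-stripped) token, chars level
def stopTok (n : List Char) : Bool :=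
  PySem.Chars.strIsdigit n || (charsIsupper n && n.length > 1)

-- the cleaned token list (what A's loop accumulates), chars level
def cleanTok : List (List Char) → List (List Char)
  | [] => []
  | t :: ts =>
    let n := PySem.Chars.stripChars t [',']
    if n.isEmpty then cleanTok ts
    else if stopTok n then []
    else n :: cleanTok ts

-- whitespace tokenization of "tok so far, then cs" (mirrors split₀.go)
def toks : List Char → List Char → List (List Char)
  | [], tok => if tok.isEmpty then [] else [tok]
  | c :: cs, tok =>
    if PySem.Chars.isspace c then
      if tok.isEmpty then toks cs [] else tok :: toks cs []
    else toks cs (tok ++ [c])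

-- B's incremental output building, as a fold
def outJoin (out : List Char) (ts : List (List Char)) : List Char :=
  ts.foldl (fun o n => if o.isEmpty then n else o ++ ' ' :: n) out

theorem toks_eq_go (cs : List Char) : ∀ (tok : List Char) (acc : List (List Char)),
    PySem.Chars.split₀.go cs tok.reverse acc = acc.reverse ++ toks cs tok := by
  induction cs with
  | nil =>
    intro tok acc
    simp only [PySem.Chars.split₀.go, toks, List.isEmpty_reverse, List.reverse_reverse]
    cases tok <;> simp
  | cons c cs ih =>
    intro tok acc
    simp only [PySem.Chars.split₀.go, toks, List.isEmpty_reverse, List.reverse_reverse]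
    by_cases hs : PySem.Chars.isspace c
    · simp only [hs, if_true]
      cases tok with
      | nil => simpa using ih [] acc
      | cons t ts =>
        simp only [List.isEmpty_cons, if_false, Bool.false_eq_true]
        have h := ih [] ((t :: ts) :: acc)
        simp only [List.reverse_nil] at h
        rw [h]; simp
    · simp only [hs, if_false, Bool.false_eq_true]
      simpa using ih (tok ++ [c]) acc

theorem split₀_eq_toks (s : List Char) : PySem.Chars.split₀ s = toks s [] := by
  simpa [PySem.Chars.split₀] using toks_eq_go s [] []

-- split() ignores leading whitespace
theorem toks_dropWhile (s : List Char) :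
    toks (s.dropWhile PySem.Chars.isspace) [] = toks s [] := by
  induction s with
  | nil => rfl
  | cons c cs ih =>
    by_cases h : PySem.Chars.isspace c
    · simp only [List.dropWhile_cons, h, if_true]
      rw [ih]; simp [toks, h]
    · simp [h]

-- a run of whitespace only flushes the pending token
theorem toks_all_ws (ws : List Char) (hws : ∀ c ∈ ws, PySem.Chars.isspace c = true) :
    ∀ tok : List Char, toks ws tok = if tok.isEmpty then [] else [tok] := by
  induction ws with
  | nil => intro tok; rfl
  | cons w ws ih =>
    intro tok
    have hw : PySem.Chars.isspace w = true := hws w (by simp)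
    have ih' := ih (fun c hc => hws c (by simp [hc]))
    simp only [toks, hw, if_true]
    cases htok : tok.isEmpty
    · simp only [Bool.false_eq_true, if_false, ih' []]; rfl
    · simp only [if_true, ih' []]; rfl

-- split() ignores trailing whitespace
theorem toks_append_ws (ws : List Char) (hws : ∀ c ∈ ws, PySem.Chars.isspace c = true) :
    ∀ (s tok : List Char), toks (s ++ ws) tok = toks s tok := by
  intro s
  induction s with
  | nil => intro tok; rw [List.nil_append, toks_all_ws ws hws tok]; rfl
  | cons c cs ih =>
    intro tok
    simp only [List.cons_append, toks]
    by_cases h : PySem.Chars.isspace c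
    · simp [h, ih]
    · simp [h, ih]

theorem toks_strip (s : List Char) :
    toks (PySem.Chars.strip s) [] = toks s [] := by
  have hdecomp : s.dropWhile PySem.Chars.isspace =
      PySem.Chars.strip s ++ ((s.dropWhile PySem.Chars.isspace).reverse.takeWhile PySem.Chars.isspace).reverse := by
    simp only [PySem.Chars.strip, PySem.Chars.lstrip, PySem.Chars.rstrip]
    rw [← List.reverse_append]
    rw [List.takeWhile_append_dropWhile]
    rw [List.reverse_reverse]
  have hws : ∀ c ∈ ((s.dropWhile PySem.Chars.isspace).reverse.takeWhile PySem.Chars.isspace).reverse,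
      PySem.Chars.isspace c = true := by
    intro c hc
    rw [List.mem_reverse] at hc
    exact List.mem_takeWhile_imp hc
  calc toks (PySem.Chars.strip s) []
      = toks (PySem.Chars.strip s ++ ((s.dropWhile PySem.Chars.isspace).reverse.takeWhile PySem.Chars.isspace).reverse) [] := (toks_append_ws _ hws _ _).symm
    _ = toks (s.dropWhile PySem.Chars.isspace) [] := by rw [← hdecomp]
    _ = toks s [] := toks_dropWhile s

-- A's loop with accumulator = append of the cleaned-token function (string level)
def cleanS : List String → List String
  | [] => []
  | t :: ts =>
    let n := PySem.Str.stripChars t ","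
    if n = "" then cleanS ts
    else if PySem.Str.strIsdigit n then []
    else if pyStrIsupper n && PySem.Str.len n > 1 then []
    else n :: cleanS ts

theorem cleanLoopA_eq (ts : List String) (acc : List String) :
    cleanLoopA ts acc = acc ++ cleanS ts := by
  induction ts generalizing acc with
  | nil => simp [cleanLoopA, cleanS]
  | cons t ts ih =>
    show (if PySem.Str.stripChars t "," = "" then cleanLoopA ts acc
      else if PySem.Str.strIsdigit (PySem.Str.stripChars t ",") then acc
      else if pyStrIsupper (PySem.Str.stripChars t ",") && PySem.Str.len (PySem.Str.stripChars t ",") > 1 then acc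
      else cleanLoopA ts (acc ++ [PySem.Str.stripChars t ","])) = acc ++
        (if PySem.Str.stripChars t "," = "" then cleanS ts
        else if PySem.Str.strIsdigit (PySem.Str.stripChars t ",") then []
        else if pyStrIsupper (PySem.Str.stripChars t ",") && PySem.Str.len (PySem.Str.stripChars t ",") > 1 then []
        else PySem.Str.stripChars t "," :: cleanS ts)
    split_ifs with h1 h2 h3
    · exact ih acc
    · simp
    · simp
    · rw [ih]; simp

-- bridge: cleanS at string level is cleanTok at chars level
theorem cleanS_toList (ts : List String) :
    (cleanS ts).map String.toList = cleanTok (ts.map String.toList) := by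
  induction ts with
  | nil => rfl
  | cons t ts ih =>
    show (if PySem.Str.stripChars t "," = "" then cleanS ts
        else if PySem.Str.strIsdigit (PySem.Str.stripChars t ",") then []
        else if pyStrIsupper (PySem.Str.stripChars t ",") && PySem.Str.len (PySem.Str.stripChars t ",") > 1 then []
        else PySem.Str.stripChars t "," :: cleanS ts).map String.toList =
      (if (PySem.Chars.stripChars t.toList [',']).isEmpty then cleanTok (ts.map String.toList)
        else if stopTok (PySem.Chars.stripChars t.toList [',']) then []
        else PySem.Chars.stripChars t.toList [','] :: cleanTok (ts.map String.toList))
    have htl : (PySem.Str.stripChars t ",").toList = PySem.Chars.stripChars t.toList [','] := by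
      rw [PySem.Str.toList_stripChars]; rfl
    have hlen : decide (PySem.Str.len (PySem.Str.stripChars t ",") > 1) =
        decide ((PySem.Chars.stripChars t.toList [',']).length > 1) := by
      rw [PySem.Str.len_eq, htl, decide_eq_decide]
      exact_mod_cast Iff.rfl
    have hup : pyStrIsupper (PySem.Str.stripChars t ",") =
        charsIsupper (PySem.Chars.stripChars t.toList [',']) := by
      unfold pyStrIsupper; rw [htl]
    have hdig : PySem.Str.strIsdigit (PySem.Str.stripChars t ",") =
        PySem.Chars.strIsdigit (PySem.Chars.stripChars t.toList [',']) := by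
      rw [PySem.Str.strIsdigit_eq, htl]
    by_cases h1 : PySem.Str.stripChars t "," = ""
    · have h1' : (PySem.Chars.stripChars t.toList [',']).isEmpty = true := by
        rw [← htl, h1]; rfl
      rw [if_pos h1, if_pos h1']; exact ih
    · have hne : PySem.Chars.stripChars t.toList [','] ≠ [] := by
        rw [← htl]
        exact fun h => h1 (String.toList_eq_nil_iff.mp h)
      have h1'' : ¬ ((PySem.Chars.stripChars t.toList [',']).isEmpty = true) := by
        intro hE
        exact hne (List.isEmpty_iff.mp hE)
      rw [if_neg h1, if_neg h1'']
      by_cases h2 : PySem.Str.strIsdigit (PySem.Str.stripChars t ",") = true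
      · have hstop : stopTok (PySem.Chars.stripChars t.toList [',']) = true := by
          unfold stopTok; rw [← hdig, h2]; rfl
        rw [if_pos h2, if_pos hstop]; rfl
      · rw [if_neg h2]
        by_cases h3 : (pyStrIsupper (PySem.Str.stripChars t ",") &&
            decide (PySem.Str.len (PySem.Str.stripChars t ",") > 1)) = true
        · have hstop : stopTok (PySem.Chars.stripChars t.toList [',']) = true := by
            unfold stopTok
            rw [← hup, ← hlen, ← hdig, Bool.or_eq_true]
            exact Or.inr h3
          rw [if_pos h3, if_pos hstop]; rfl
        · have hstop : stopTok (PySem.Chars.stripChars t.toList [',']) = false := by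
            unfold stopTok
            rw [← hup, ← hlen, ← hdig]
            simp only [Bool.or_eq_false_iff]
            exact ⟨by simpa using h2, by simpa using h3⟩
          rw [if_neg h3, if_neg (by simp [hstop]), List.map_cons, htl, ih]

theorem cleanTok_ne_nil (ts : List (List Char)) :
    ∀ n ∈ cleanTok ts, n.isEmpty = false := by
  induction ts with
  | nil => intro n hn; cases hn
  | cons t ts ih =>
    intro n hn
    simp only [cleanTok] at hn
    split_ifs at hn with h1 h2
    · exact ih n hn
    · cases hn
    · rcases List.mem_cons.mp hn with h | h
      · subst h; simpa using h1
      · exact ih n h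

-- B's incremental concatenation, once nonempty, is a plain flatMap
theorem outJoin_nonempty (ts : List (List Char)) :
    ∀ out : List Char, out ≠ [] →
      outJoin out ts = out ++ ts.flatMap (fun t => ' ' :: t) := by
  induction ts with
  | nil => intro out _; simp [outJoin]
  | cons t ts ih =>
    intro out hout
    have h1 : out.isEmpty = false := by simpa using hout
    simp only [outJoin, List.foldl_cons, h1, Bool.false_eq_true, if_false]
    have h2 := ih (out ++ ' ' :: t) (by simp)
    simp only [outJoin] at h2
    rw [h2]; simp

theorem join_space_eq_flatMap (L : List (List Char)) :
    ∀ t : List Char, PySem.Chars.join [' '] (t :: L) = t ++ L.flatMap (fun u => ' ' :: u) := by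
  induction L with
  | nil => intro t; rw [PySem.Chars.join_singleton]; simp
  | cons u L ih =>
    intro t
    rw [PySem.Chars.join_cons_cons, ih u]
    simp

theorem outJoin_nil (ts : List (List Char)) (hts : ∀ t ∈ ts, t.isEmpty = false) :
    outJoin [] ts = PySem.Chars.join [' '] ts := by
  cases ts with
  | nil => simp [outJoin, PySem.Chars.join_nil]
  | cons t L =>
    have ht : t ≠ [] := by
      simpa using hts t (by simp)
    have h0 : outJoin [] (t :: L) = outJoin t L := by
      simp [outJoin]
    rw [h0, outJoin_nonempty L t ht, join_space_eq_flatMap L t]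

-- the main B invariant: the streaming loop computes outJoin of the cleaned tokens
theorem emitB_empty (tok out : List Char) (h1 : (PySem.Chars.stripChars tok [',']).isEmpty = true) :
    emitB tok out = (false, out) := by
  simp [emitB, h1]

theorem emitB_stop (tok out : List Char) (h1 : (PySem.Chars.stripChars tok [',']).isEmpty = false)
    (h2 : stopTok (PySem.Chars.stripChars tok [',']) = true) :
    emitB tok out = (true, out) := by
  have h2' := h2
  unfold stopTok at h2'
  simp [emitB, h1, h2']

theorem emitB_keep (tok out : List Char) (h1 : (PySem.Chars.stripChars tok [',']).isEmpty = false)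
    (h2 : stopTok (PySem.Chars.stripChars tok [',']) = false) :
    emitB tok out = (false, if out.isEmpty then PySem.Chars.stripChars tok [',']
      else out ++ ' ' :: PySem.Chars.stripChars tok [',']) := by
  have h2' := h2
  unfold stopTok at h2'
  simp [emitB, h1, h2']

theorem loopB_eq (cs : List Char) : ∀ (tok out : List Char),
    loopB cs tok out = outJoin out (cleanTok (toks cs tok)) := by
  induction cs with
  | nil =>
    intro tok out
    show (emitB tok out).2 = outJoin out (cleanTok (if tok.isEmpty then [] else [tok]))
    cases htok : tok.isEmpty
    · simp only [Bool.false_eq_true, if_false]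
      by_cases h1 : (PySem.Chars.stripChars tok [',']).isEmpty = true
      · rw [emitB_empty tok out h1]
        have hr : cleanTok [tok] = [] := by simp [cleanTok, h1]
        rw [hr]; rfl
      · have h1' : (PySem.Chars.stripChars tok [',']).isEmpty = false := by
          simpa using h1
        by_cases h2 : stopTok (PySem.Chars.stripChars tok [',']) = true
        · rw [emitB_stop tok out h1' h2]
          have hr : cleanTok [tok] = [] := by simp [cleanTok, h1', h2]
          rw [hr]; rfl
        · have h2' : stopTok (PySem.Chars.stripChars tok [',']) = false := by
            simpa using h2
          rw [emitB_keep tok out h1' h2']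
          have hr : cleanTok [tok] = [PySem.Chars.stripChars tok [',']] := by
            simp [cleanTok, h1', h2']
          rw [hr]; rfl
    · have : tok = [] := by simpa using htok
      subst this
      simp [emitB, PySem.Chars.stripChars, outJoin, cleanTok]
  | cons c cs ih =>
    intro tok out
    show (if PySem.Chars.isspace c then
        match emitB tok out with
        | (true, o) => o
        | (false, o) => loopB cs [] o
      else loopB cs (tok ++ [c]) out) = outJoin out (cleanTok (toks (c :: cs) tok))
    by_cases hs : PySem.Chars.isspace c
    · simp only [hs, if_true, toks]
      cases htok : tok.isEmpty
      · simp only [Bool.false_eq_true, if_false]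
        by_cases h1 : (PySem.Chars.stripChars tok [',']).isEmpty = true
        · rw [emitB_empty tok out h1]
          have hr : cleanTok (tok :: toks cs []) = cleanTok (toks cs []) := by
            simp [cleanTok, h1]
          rw [hr]
          exact ih [] out
        · have h1' : (PySem.Chars.stripChars tok [',']).isEmpty = false := by
            simpa using h1
          by_cases h2 : stopTok (PySem.Chars.stripChars tok [',']) = true
          · rw [emitB_stop tok out h1' h2]
            have hr : cleanTok (tok :: toks cs []) = [] := by
              simp [cleanTok, h1', h2]
            rw [hr]; rfl
          · have h2' : stopTok (PySem.Chars.stripChars tok [',']) = false := by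
              simpa using h2
            rw [emitB_keep tok out h1' h2']
            have hr : cleanTok (tok :: toks cs []) =
                PySem.Chars.stripChars tok [','] :: cleanTok (toks cs []) := by
              simp [cleanTok, h1', h2']
            rw [hr]
            exact ih [] _
      · have : tok = [] := by simpa using htok
        subst this
        simp only [if_true]
        have he : emitB [] out = (false, out) := by
          simp [emitB, PySem.Chars.stripChars]
        rw [he]
        exact ih [] out
    · simp only [hs, if_false, Bool.false_eq_true, toks]
      exact ih (tok ++ [c]) out

-- ===== VERDICT (by name: the statement is the Claim_ definition above) =====
theorem clean_author_candidate_py_spec : Claim_equal_clean_author_candidate_py := by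
  intro candidate _
  unfold Spec_clean_author_candidate_py clean_author_candidate_py clean_author_candidate_py_alt
  apply String.toList_inj.mp
  rw [String.toList_ofList, PySem.Str.toList_join, loopB_eq]
  rw [cleanLoopA_eq, List.nil_append, cleanS_toList, PySem.Str.split₀_map_toList,
    PySem.Str.toList_strip, split₀_eq_toks, toks_strip]
  rw [outJoin_nil _ (cleanTok_ne_nil _)]
  rfl
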